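-- pv_equiv track=rewrite | github.com/RushiGoswamiPromact/licenSage | backend/routes/dependency_file.py | is_base64
-- ===== SOURCE A (Python) =====
-- def is_base64(s):
--     """Check if a string might be base64 encoded"""
--     try:
--         # Check if the string contains only valid base64 characters
--         return all(
--             c in "ABCDEFGHIJKLMNOPQRSTUVWXYZabcdefghijklmnopqrstuvwxyz0123456789+/="
--             for c in s
--         )
--     except Exception:
--         return False
-- ===== SOURCE B (Python) =====
-- import re
--
-- # One compiled character-class pattern; fullmatch on the whole string replaces
-- # the per-character generator scan.  '*' keeps the empty string True.
-- _B64_RE = re.compile(r"[A-Za-z0-9+/=]*")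
--
-- def is_base64(s):
--     """Check if a string might be base64 encoded"""
--     try:
--         return bool(_B64_RE.fullmatch(s))
--     except Exception:
--         return False
-- ===== Notes on version B (the rewrite author's own statement) =====
-- stated objective: faster
-- what changed: Replaces the Python-level all(...) generator that tests each character by substring membership in the 65-char alphabet string with a single compiled-regex character-class fullmatch over the whole string (one C-level pass of range checks).
import Mathlib
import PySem

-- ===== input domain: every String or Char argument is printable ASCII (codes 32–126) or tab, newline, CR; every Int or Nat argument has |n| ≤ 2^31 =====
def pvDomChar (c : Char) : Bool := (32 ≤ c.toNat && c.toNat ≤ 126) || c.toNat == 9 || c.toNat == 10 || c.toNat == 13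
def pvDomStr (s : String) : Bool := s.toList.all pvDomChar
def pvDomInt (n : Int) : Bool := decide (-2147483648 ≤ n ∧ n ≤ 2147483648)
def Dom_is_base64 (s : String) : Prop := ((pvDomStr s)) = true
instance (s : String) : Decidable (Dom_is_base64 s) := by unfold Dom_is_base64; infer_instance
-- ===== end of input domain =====

-- B replaces A's per-character membership scan of the alphabet string with one
-- compiled regex character-class fullmatch (objective: idiomatic).


-- ===== PORT A =====
-- all(c in "<alphabet>" for c in s); 'c in str' is PySem.Str.isIn (exact on ASCII)
def is_base64 (s : String) : Bool :=
  s.toList.all (fun c =>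
    PySem.Str.isIn (String.ofList [c])
      "ABCDEFGHIJKLMNOPQRSTUVWXYZabcdefghijklmnopqrstuvwxyz0123456789+/=")

-- ===== PORT B =====
-- Hand port of the regex engine's semantics for the pattern [A-Za-z0-9+/=]* :
-- the character class is the regex's range/literal checks (exact: no PySem regex
-- primitive exists, so the pattern's meaning is transcribed step for step).
def b64ClassMatch (c : Char) : Bool :=
  ('A' ≤ c && c ≤ 'Z') || ('a' ≤ c && c ≤ 'z') || ('0' ≤ c && c ≤ '9') ||
  c == '+' || c == '/' || c == '='

-- Kleene star of the class, fullmatch: consume class matches; succeed only at end.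
def b64StarMatch : List Char → Bool
  | [] => true
  | c :: rest => b64ClassMatch c && b64StarMatch rest

-- bool(_B64_RE.fullmatch(s))
def is_base64_alt (s : String) : Bool := b64StarMatch s.toList

-- ===== PRECONDITION & SPEC =====
def Spec_is_base64 (s : String) (out : Bool) : Prop := out = is_base64_alt s
instance (s : String) (out : Bool) : Decidable (Spec_is_base64 s out) := by unfold Spec_is_base64; infer_instance

-- ===== CLAIM (what is proved, stated in full; the proofs are below) =====
def Claim_equal_is_base64 : Prop := ∀ (s : String), Dom_is_base64 s → Spec_is_base64 s (is_base64 s)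

-- ===== LEMMAS AND PROOFS =====

-- '[c] in t' (single-character substring test) is membership of c in t's characters
theorem isIn_singleton (c : Char) (t : String) :
    PySem.Str.isIn (String.ofList [c]) t = t.toList.contains c := by
  rw [PySem.Str.isIn_eq]
  rcases h : PySem.Chars.isIn (String.ofList [c]).toList t.toList with _ | _
  · rw [PySem.Chars.isIn_eq_false_iff, String.toList_ofList] at h
    symm
    simp only [List.contains_eq_mem, decide_eq_false_iff_not]
    intro hc
    obtain ⟨pre, suf, hps⟩ := List.append_of_mem hc
    exact h ⟨pre, suf, by rw [hps]; simp⟩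
  · rw [PySem.Chars.isIn_iff_infix, String.toList_ofList] at h
    symm
    simp only [List.contains_eq_mem, decide_eq_true_iff]
    exact h.subset (by simp)

-- for every character of the domain (code ≤ 126), membership in the alphabet
-- string equals the regex class test; checked by decision over the 127 codes
set_option maxRecDepth 8192 in
theorem perChar (c : Char) (h : c.toNat ≤ 126) :
    ("ABCDEFGHIJKLMNOPQRSTUVWXYZabcdefghijklmnopqrstuvwxyz0123456789+/=".toList.contains c)
      = b64ClassMatch c := by
  have key : ∀ n : Fin 127,
      ("ABCDEFGHIJKLMNOPQRSTUVWXYZabcdefghijklmnopqrstuvwxyz0123456789+/=".toList.contains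
        (Char.ofNat n.val)) = b64ClassMatch (Char.ofNat n.val) := by decide
  have hc : Char.ofNat c.toNat = c := by
    have hv : Nat.isValidChar c.toNat := Or.inl (by omega)
    simp only [Char.ofNat, hv, dite_true]
    exact Char.ext rfl
  have := key ⟨c.toNat, by omega⟩
  rwa [hc] at this

-- A's scan equals B's star matcher on every list of domain characters
theorem starMatch_eq (l : List Char) (hdom : ∀ c ∈ l, pvDomChar c = true) :
    (l.all fun c =>
      PySem.Str.isIn (String.ofList [c])
        "ABCDEFGHIJKLMNOPQRSTUVWXYZabcdefghijklmnopqrstuvwxyz0123456789+/=")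
      = b64StarMatch l := by
  induction l with
  | nil => rfl
  | cons c rest ih =>
    have hle : c.toNat ≤ 126 := by
      have hc := hdom c (by simp)
      unfold pvDomChar at hc
      simp only [Bool.or_eq_true, Bool.and_eq_true, decide_eq_true_iff, beq_iff_eq] at hc
      omega
    rw [List.all_cons, b64StarMatch, isIn_singleton, perChar c hle,
        ih (fun x hx => hdom x (List.mem_cons_of_mem _ hx))]

-- ===== VERDICT (by name: the statement is the Claim_ definition above) =====
theorem is_base64_spec : Claim_equal_is_base64 := by
  intro s hdom
  unfold Spec_is_base64 is_base64 is_base64_alt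
  unfold Dom_is_base64 pvDomStr at hdom
  rw [List.all_eq_true] at hdom
  exact starMatch_eq s.toList hdom
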